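-- pv_equiv track=rewrite | github.com/zacharyartman/Cicero | text_extractor.py | extract_text_after_phrase
-- ===== SOURCE A (Python) =====
-- def extract_text_after_phrase(text_content, beginning_phrase, end_phrase):
--     """
--     Read in a text file and save contents of file in a string based on
--     a beginning and endphrase
--     """
--     found = False
--     lines = text_content.split('\n')
--     extracted_text = ''
--     for line in lines:
--         if beginning_phrase in line:
--             found = True
--         if found:
--             extracted_text += f" {line}"
--         if end_phrase in line:
--             break
--     return extracted_text
-- ===== SOURCE B (Python) =====
-- def extract_text_after_phrase(text_content, beginning_phrase, end_phrase):
--     """Boundary-then-slice: take lines up to and including the first end-phrase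
--     line, drop the prefix before the first begin-phrase line, then join."""
--     lines = text_content.split('\n')
--     segment = []
--     for line in lines:
--         segment.append(line)
--         if end_phrase in line:
--             break
--     while segment and beginning_phrase not in segment[0]:
--         segment.pop(0)
--     if not segment:
--         return ''
--     return ' ' + ' '.join(segment)
-- ===== Notes on version B (the rewrite author's own statement) =====
-- stated objective: alternative
-- what changed: Replaces A's single flag-driven accumulating pass with a boundary decomposition: take lines up to and including the first end-phrase line, drop the leading lines before the first begin-phrase line, then build the result with one join.
import Mathlib
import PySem

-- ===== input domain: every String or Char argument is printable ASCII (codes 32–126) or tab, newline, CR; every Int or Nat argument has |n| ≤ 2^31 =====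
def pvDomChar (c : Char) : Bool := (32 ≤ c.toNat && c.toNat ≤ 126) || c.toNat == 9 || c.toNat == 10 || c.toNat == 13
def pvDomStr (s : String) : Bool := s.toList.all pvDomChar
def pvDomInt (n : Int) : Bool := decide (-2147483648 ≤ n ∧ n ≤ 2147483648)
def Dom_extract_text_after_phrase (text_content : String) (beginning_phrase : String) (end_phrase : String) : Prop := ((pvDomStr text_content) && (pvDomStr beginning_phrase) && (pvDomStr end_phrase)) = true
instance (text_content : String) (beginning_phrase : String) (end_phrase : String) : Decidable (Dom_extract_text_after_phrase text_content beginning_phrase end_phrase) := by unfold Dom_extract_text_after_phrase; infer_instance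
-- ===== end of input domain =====

-- B replaces A's flag-driven accumulating pass by a take-until/drop-until boundary decomposition
-- followed by one join ('alternative' objective: same cost, different structure); return values proved equal on all inputs.

-- ===== PORT A =====
-- A's loop: state = (found, extracted_text); begin-check, conditional append, end-break, in A's order.
def pvALoop (beginning_phrase end_phrase : String) : List String → Bool → String → String
  | [], _, acc => acc
  | l :: ls, found, acc =>
    let found' := if PySem.Str.isIn beginning_phrase l then true else found
    let acc' := if found' then acc ++ (" " ++ l) else acc
    if PySem.Str.isIn end_phrase l then acc' else pvALoop beginning_phrase end_phrase ls found' acc'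

-- text_content.split('\n'): the separator is the nonempty literal "\n", so split? is always `some`.
def extract_text_after_phrase (text_content : String) (beginning_phrase : String) (end_phrase : String) : String :=
  pvALoop beginning_phrase end_phrase ((PySem.Str.split? text_content "\n").getD []) false ""

-- ===== PORT B =====
-- Source B's first loop: append each line, break after the first line containing end_phrase.
def pvTakeToEnd (end_phrase : String) : List String → List String
  | [] => []
  | l :: ls => if PySem.Str.isIn end_phrase l then [l] else l :: pvTakeToEnd end_phrase ls

-- Source B's while loop: pop from the front while the head does not contain beginning_phrase.
def pvDropToBegin (beginning_phrase : String) : List String → List String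
  | [] => []
  | l :: ls => if PySem.Str.isIn beginning_phrase l then l :: ls else pvDropToBegin beginning_phrase ls

def extract_text_after_phrase_alt (text_content : String) (beginning_phrase : String) (end_phrase : String) : String :=
  match pvDropToBegin beginning_phrase (pvTakeToEnd end_phrase ((PySem.Str.split? text_content "\n").getD [])) with
  | [] => ""
  | x :: xs => " " ++ PySem.Str.join " " (x :: xs)

-- ===== PRECONDITION & SPEC =====
def Spec_extract_text_after_phrase (text_content : String) (beginning_phrase : String) (end_phrase : String) (out : String) : Prop := out = extract_text_after_phrase_alt text_content beginning_phrase end_phrase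
instance (text_content : String) (beginning_phrase : String) (end_phrase : String) (out : String) : Decidable (Spec_extract_text_after_phrase text_content beginning_phrase end_phrase out) := by unfold Spec_extract_text_after_phrase; infer_instance

-- ===== CLAIM (what is proved, stated in full; the proofs are below) =====
def Claim_equal_extract_text_after_phrase : Prop := ∀ (text_content : String) (beginning_phrase : String) (end_phrase : String), Dom_extract_text_after_phrase text_content beginning_phrase end_phrase → Spec_extract_text_after_phrase text_content beginning_phrase end_phrase (extract_text_after_phrase text_content beginning_phrase end_phrase)

-- ===== LEMMAS AND PROOFS =====

-- the string A accumulates for a block of kept lines: " line1 line2 …"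
def pvSJ : List String → String
  | [] => ""
  | l :: ls => (" " ++ l) ++ pvSJ ls

theorem pvSJ_eq_join : ∀ (x : String) (xs : List String),
    pvSJ (x :: xs) = " " ++ PySem.Str.join " " (x :: xs) := by
  intro x xs
  induction xs generalizing x with
  | nil =>
      rw [← String.toList_inj]
      simp [pvSJ, PySem.Chars.join_singleton]
  | cons y ys ih =>
      have h := congrArg String.toList (ih y)
      rw [← String.toList_inj]
      simp [pvSJ] at h
      simpa [pvSJ, PySem.Chars.join_cons_cons] using h

theorem pvALoop_eq (bp ep : String) : ∀ (ls : List String) (found : Bool) (acc : String),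
    pvALoop bp ep ls found acc =
      acc ++ (if found then pvSJ (pvTakeToEnd ep ls)
              else pvSJ (pvDropToBegin bp (pvTakeToEnd ep ls))) := by
  intro ls
  induction ls with
  | nil =>
      intro found acc
      cases found <;> simp [pvALoop, pvTakeToEnd, pvDropToBegin, pvSJ, String.append_empty]
  | cons l ls ih =>
      intro found acc
      by_cases hb : PySem.Chars.isIn bp.toList l.toList = true <;>
      by_cases he : PySem.Chars.isIn ep.toList l.toList = true <;>
      cases found <;>
      simp [pvALoop, pvTakeToEnd, pvDropToBegin, pvSJ, hb, he, ih,
            String.append_empty, String.append_assoc]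

-- ===== VERDICT (by name: the statement is the Claim_ definition above) =====
theorem extract_text_after_phrase_spec : Claim_equal_extract_text_after_phrase := by
  intro t bp ep _
  unfold Spec_extract_text_after_phrase extract_text_after_phrase extract_text_after_phrase_alt
  rw [pvALoop_eq]
  cases h : pvDropToBegin bp (pvTakeToEnd ep ((PySem.Str.split? t "\n").getD [])) with
  | nil =>
      simp [pvSJ, String.append_empty]
  | cons x xs =>
      rw [← String.toList_inj]
      simp [pvSJ_eq_join]
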